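-- pv_equiv track=rewrite | github.com/TolIkUshkevich/Test | main.py | find_expection
-- ===== SOURCE A (Python) =====
-- def find_expection(lisst):
--     odd = 0
--     even = 0
--     result = 0
--     for i in lisst:
--         if i % 2 == 0:
--             even += 1
--         else:
--             odd += 1
--
--     for i in lisst:
--         if odd > even:
--             if i % 2 == 0:
--                 result = i
--         else:
--             if i % 2 != 0:
--                 result = i
--     return result
-- ===== SOURCE B (Python) =====
-- def find_expection(lisst):
--     odd = even = 0
--     last_odd = last_even = 0
--     for i in lisst:
--         if i % 2 == 0:
--             even += 1
--             last_even = i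
--         else:
--             odd += 1
--             last_odd = i
--     return last_even if odd > even else last_odd
-- ===== Notes on version B (the rewrite author's own statement) =====
-- stated objective: alternative
-- what changed: Single pass maintaining parity counts together with the last-seen element of each parity, answering in O(1) afterwards, instead of A's counting pass followed by a full rescan-with-overwrite.
import Mathlib
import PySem

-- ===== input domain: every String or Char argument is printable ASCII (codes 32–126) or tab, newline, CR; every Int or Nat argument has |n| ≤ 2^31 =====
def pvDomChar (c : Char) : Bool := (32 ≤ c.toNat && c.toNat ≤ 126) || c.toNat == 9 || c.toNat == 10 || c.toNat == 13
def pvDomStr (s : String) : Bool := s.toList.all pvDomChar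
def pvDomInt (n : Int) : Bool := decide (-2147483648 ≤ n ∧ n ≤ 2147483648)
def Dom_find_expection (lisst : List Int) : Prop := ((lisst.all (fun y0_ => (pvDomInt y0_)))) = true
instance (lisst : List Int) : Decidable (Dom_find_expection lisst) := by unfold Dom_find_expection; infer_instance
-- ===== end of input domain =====

-- B makes a single pass maintaining parity counts and the last-seen element of each parity,
-- replacing A's counting pass plus full rescan-with-overwrite; proved equal to A on all inputs.

-- ===== PORT A =====
def find_expection (lisst : List Int) : Int :=
  -- first loop: count odd/even (state = (odd, even))
  let c := lisst.foldl
    (fun (p : Int × Int) i =>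
      if PySem.Int.mod i 2 == 0 then (p.1, p.2 + 1) else (p.1 + 1, p.2))
    (0, 0)
  -- second loop: overwrite result with each element of the chosen parity
  lisst.foldl
    (fun result i =>
      if c.1 > c.2 then
        (if PySem.Int.mod i 2 == 0 then i else result)
      else
        (if PySem.Int.mod i 2 != 0 then i else result))
    0

-- ===== PORT B =====
-- single pass; state = (odd, even, last_even, last_odd)
def find_expection_alt (lisst : List Int) : Int :=
  let s := lisst.foldl
    (fun (p : Int × Int × Int × Int) i =>
      if PySem.Int.mod i 2 == 0 then (p.1, p.2.1 + 1, i, p.2.2.2)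
      else (p.1 + 1, p.2.1, p.2.2.1, i))
    (0, 0, 0, 0)
  if s.1 > s.2.1 then s.2.2.1 else s.2.2.2

-- ===== PRECONDITION & SPEC =====
def Spec_find_expection (lisst : List Int) (out : Int) : Prop := out = find_expection_alt lisst
instance (lisst : List Int) (out : Int) : Decidable (Spec_find_expection lisst out) := by unfold Spec_find_expection; infer_instance

-- ===== CLAIM =====
def Claim_equal_find_expection : Prop := ∀ (lisst : List Int), Dom_find_expection lisst → Spec_find_expection lisst (find_expection lisst)

-- ===== LEMMAS AND PROOFS =====

-- A's first loop computes the lengths of the two parity classes.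
theorem fe_count (l : List Int) (o e : Int) :
    l.foldl (fun (p : Int × Int) i =>
        if PySem.Int.mod i 2 == 0 then (p.1, p.2 + 1) else (p.1 + 1, p.2)) (o, e)
      = (o + (l.filter (fun i => PySem.Int.mod i 2 != 0)).length,
         e + (l.filter (fun i => PySem.Int.mod i 2 == 0)).length) := by
  induction l generalizing o e with
  | nil => simp
  | cons a t ih =>
    rw [List.foldl_cons, List.filter_cons, List.filter_cons]
    by_cases h : (PySem.Int.mod a 2 == 0) = true
    · have hne : (PySem.Int.mod a 2 != 0) = false := by
        show (!(PySem.Int.mod a 2 == 0)) = false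
        rw [h]; rfl
      rw [if_pos h, ih, if_pos h, if_neg (by rw [hne]; exact Bool.false_ne_true)]
      simp only [List.length_cons, Prod.mk.injEq, true_and]
      push_cast; omega
    · have hb : (PySem.Int.mod a 2 != 0) = true := by
        show (!(PySem.Int.mod a 2 == 0)) = true
        rw [Bool.eq_false_iff.mpr h]; rfl
      rw [if_neg h, ih, if_neg h, if_pos hb]
      simp only [List.length_cons, Prod.mk.injEq, and_true]
      push_cast; omega

-- last-of-cons default shuffle
theorem fe_getLast_cons {α : Type} (a r : α) (l : List α) :
    ((a :: l).getLast?).getD r = (l.getLast?).getD a := by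
  cases hl : l.getLast? with
  | none =>
    have : l = [] := List.getLast?_eq_none_iff.mp hl
    simp [this]
  | some x =>
    cases l with
    | nil => simp at hl
    | cons b u => simp [List.getLast?_cons_cons, hl]

-- A's "keep the last matching element" fold equals the last of the filtered list.
theorem fe_lastFold (p : Int → Bool) (l : List Int) (r : Int) :
    l.foldl (fun result i => if p i then i else result) r
      = ((l.filter p).getLast?).getD r := by
  induction l generalizing r with
  | nil => simp
  | cons a t ih =>
    by_cases h : p a = true
    · simp only [List.foldl_cons, h, if_pos, List.filter_cons_of_pos h]
      rw [ih, fe_getLast_cons]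
    · simp only [List.foldl_cons, h, Bool.false_eq_true, ite_false,
        List.filter_cons_of_neg h]
      exact ih r

-- B's single-pass fold invariant: counts and last-seen of each parity.
theorem fe_onePass (l : List Int) (o e le lo : Int) :
    l.foldl (fun (p : Int × Int × Int × Int) i =>
        if PySem.Int.mod i 2 == 0 then (p.1, p.2.1 + 1, i, p.2.2.2)
        else (p.1 + 1, p.2.1, p.2.2.1, i)) (o, e, le, lo)
      = (o + (l.filter (fun i => PySem.Int.mod i 2 != 0)).length,
         e + (l.filter (fun i => PySem.Int.mod i 2 == 0)).length,
         ((l.filter (fun i => PySem.Int.mod i 2 == 0)).getLast?).getD le,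
         ((l.filter (fun i => PySem.Int.mod i 2 != 0)).getLast?).getD lo) := by
  induction l generalizing o e le lo with
  | nil => simp
  | cons a t ih =>
    rw [List.foldl_cons, List.filter_cons, List.filter_cons]
    by_cases h : (PySem.Int.mod a 2 == 0) = true
    · have hne : (PySem.Int.mod a 2 != 0) = false := by
        show (!(PySem.Int.mod a 2 == 0)) = false
        rw [h]; rfl
      rw [if_pos h, ih, if_pos h, if_neg (by rw [hne]; exact Bool.false_ne_true)]
      simp only [List.length_cons, Prod.mk.injEq, true_and]
      refine ⟨by push_cast; omega, by rw [fe_getLast_cons], trivial⟩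
    · have hb : (PySem.Int.mod a 2 != 0) = true := by
        show (!(PySem.Int.mod a 2 == 0)) = true
        rw [Bool.eq_false_iff.mpr h]; rfl
      rw [if_neg h, ih, if_neg h, if_pos hb]
      simp only [List.length_cons, Prod.mk.injEq]
      refine ⟨by push_cast; omega, trivial, trivial, by rw [fe_getLast_cons]⟩

theorem fe_main (lisst : List Int) :
    find_expection lisst = find_expection_alt lisst := by
  unfold find_expection find_expection_alt
  rw [fe_count, fe_onePass]
  simp only [zero_add]
  by_cases hgt : ((lisst.filter (fun i => PySem.Int.mod i 2 != 0)).length : Int)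
      > ((lisst.filter (fun i => PySem.Int.mod i 2 == 0)).length : Int)
  · rw [if_pos hgt]
    simp only [hgt, ite_true]
    rw [fe_lastFold]
  · rw [if_neg hgt]
    simp only [hgt, ite_false]
    rw [fe_lastFold]

-- ===== VERDICT =====
theorem find_expection_spec : Claim_equal_find_expection := by
  intro lisst _
  unfold Spec_find_expection
  exact fe_main lisst
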